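-- pv_equiv track=rewrite | github.com/Arpan243/Oracle | get_the_groups.py | solve
-- ===== SOURCE A (Python) =====
-- def find_parent(i, parent):
--     if parent[i] == i:
--         return i
--     parent[i] = find_parent(parent[i], parent)  # Path compression
--     return parent[i]
--
-- def solve(queries, s1, s2, n, m):
--     result = []
--     parent = list(range(m + 1))  # Initialize parent pointers
--     size = [1] * (m + 1)         # Initialize size array
--
--     for i in range(n):
--         if queries[i] == "Friend":
--             x = find_parent(s1[i], parent)
--             y = find_parent(s2[i], parent)
--             if x != y:
--                 # Union by size
--                 parent[y] = x
--                 size[x] += size[y]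
--         else:
--             # Output the sum of the sizes of the sets that s1[i] and s2[i] belong to
--             result.append(size[find_parent(s1[i], parent)] + size[find_parent(s2[i], parent)])
--
--     return result
-- ===== SOURCE B (Python) =====
-- def solve(queries, s1, s2, n, m):
--     # Flat labelling instead of union-find: label[v] is the group id of v,
--     # a union relabels the whole losing group, a query counts labels directly.
--     label = list(range(m + 1))
--     result = []
--     for i in range(n):
--         a = label[s1[i]]
--         b = label[s2[i]]
--         if queries[i] == "Friend":
--             if a != b:
--                 label = [a if c == b else c for c in label]
--         else:
--             result.append(label.count(a) + label.count(b))
--     return result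
-- ===== Notes on version B (the rewrite author's own statement) =====
-- stated objective: alternative
-- what changed: B replaces the union-find forest (parent pointers, recursive path-compressing find, size array) by a flat group-label array: each union relabels every member of the losing group with one list comprehension, and a sum query simply counts labels, so there is no find, no parent mutation and no size bookkeeping.
import Mathlib
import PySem

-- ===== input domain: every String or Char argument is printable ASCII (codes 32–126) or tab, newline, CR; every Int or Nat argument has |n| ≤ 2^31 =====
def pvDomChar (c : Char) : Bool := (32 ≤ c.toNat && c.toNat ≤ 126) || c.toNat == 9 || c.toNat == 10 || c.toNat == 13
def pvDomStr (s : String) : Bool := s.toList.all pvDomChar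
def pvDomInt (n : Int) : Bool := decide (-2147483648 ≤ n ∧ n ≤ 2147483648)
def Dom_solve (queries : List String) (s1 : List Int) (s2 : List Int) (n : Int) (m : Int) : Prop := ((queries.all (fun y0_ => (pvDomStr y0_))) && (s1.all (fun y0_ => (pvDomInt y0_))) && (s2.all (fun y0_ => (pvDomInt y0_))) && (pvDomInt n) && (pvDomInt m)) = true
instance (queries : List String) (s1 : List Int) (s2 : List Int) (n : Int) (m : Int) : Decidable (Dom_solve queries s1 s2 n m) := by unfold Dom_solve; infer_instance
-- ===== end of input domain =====

-- B drops the union-find forest entirely: it keeps a flat group-label array, relabels the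
-- losing group on each union and answers queries by counting labels (objective: alternative).
-- Neither implementation mutates its arguments.

-- ===== PORT A =====
-- find_parent of A: structural recursion on a fuel bound (n.toNat + 1 in solve, always
-- sufficient on inputs satisfying Pre_solve, where each union deepens a chain by at most one).
def findA : Nat → Int → List Int → Int × List Int
  | 0, i, parent => (i, parent)
  | f+1, i, parent =>
    let pi := PySem.List.pyGetD parent i 0
    if pi = i then (i, parent)
    else
      let res := findA f pi parent
      (res.1, PySem.List.pySetD res.2 i res.1)

-- the body of A's query loop (helper of the port; state = (result, parent, size))
def stepA (queries : List String) (s1 : List Int) (s2 : List Int) (fuel : Nat)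
    (st : List Int × List Int × List Int) (i : Int) : List Int × List Int × List Int :=
  let result := st.1; let parent := st.2.1; let size := st.2.2
  if PySem.List.pyGetD queries i "" = "Friend" then
    let fx := findA fuel (PySem.List.pyGetD s1 i 0) parent
    let fy := findA fuel (PySem.List.pyGetD s2 i 0) fx.2
    if fx.1 ≠ fy.1 then
      (result, PySem.List.pySetD fy.2 fy.1 fx.1,
       PySem.List.pySetD size fx.1 (PySem.List.pyGetD size fx.1 0 + PySem.List.pyGetD size fy.1 0))
    else (result, fy.2, size)
  else
    let fx := findA fuel (PySem.List.pyGetD s1 i 0) parent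
    let fy := findA fuel (PySem.List.pyGetD s2 i 0) fx.2
    (result ++ [PySem.List.pyGetD size fx.1 0 + PySem.List.pyGetD size fy.1 0], fy.2, size)

def solve (queries : List String) (s1 : List Int) (s2 : List Int) (n : Int) (m : Int) : List Int :=
  ((PySem.List.pyRange 0 n 1).foldl (stepA queries s1 s2 (n.toNat + 1))
    ([], PySem.List.pyRange 0 (m+1) 1, List.replicate (m+1).toNat (1:Int))).1

-- ===== PORT B =====
-- the body of B's query loop (helper of the port; state = (result, label))
def stepB (queries : List String) (s1 : List Int) (s2 : List Int)
    (st : List Int × List Int) (i : Int) : List Int × List Int :=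
  let result := st.1; let label := st.2
  let a := PySem.List.pyGetD label (PySem.List.pyGetD s1 i 0) 0
  let b := PySem.List.pyGetD label (PySem.List.pyGetD s2 i 0) 0
  if PySem.List.pyGetD queries i "" = "Friend" then
    if a ≠ b then (result, label.map (fun c => if c = b then a else c))
    else (result, label)
  else
    (result ++ [(PySem.List.count label a : Int) + (PySem.List.count label b : Int)], label)

def solve_alt (queries : List String) (s1 : List Int) (s2 : List Int) (n : Int) (m : Int) : List Int :=
  ((PySem.List.pyRange 0 n 1).foldl (stepB queries s1 s2)
    ([], PySem.List.pyRange 0 (m+1) 1)).1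

-- ===== PRECONDITION & SPEC =====
-- Pre_solve: exactly the inputs where Python A raises no exception — every loop index i < n
-- lies inside the three lists and both queried elements are valid (possibly negative) indices
-- into the (m+1)-element parent array; outside it A raises IndexError.
def Pre_solve (queries : List String) (s1 : List Int) (s2 : List Int) (n : Int) (m : Int) : Prop :=
  n.toNat ≤ queries.length ∧ n.toNat ≤ s1.length ∧ n.toNat ≤ s2.length ∧
  ∀ i ∈ List.range (min n.toNat s1.length),
    PySem.Raise.InRange (m+1).toNat (s1.getD i 0) ∧ PySem.Raise.InRange (m+1).toNat (s2.getD i 0)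
instance (queries : List String) (s1 : List Int) (s2 : List Int) (n : Int) (m : Int) : Decidable (Pre_solve queries s1 s2 n m) := by unfold Pre_solve; infer_instance

def pvWitness_solve : List String × List Int × List Int × Int × Int :=
  (["Friend", "Sum"], [1, 1], [2, -1], 2, 2)

def Spec_solve (queries : List String) (s1 : List Int) (s2 : List Int) (n : Int) (m : Int) (out : List Int) : Prop := out = solve_alt queries s1 s2 n m
instance (queries : List String) (s1 : List Int) (s2 : List Int) (n : Int) (m : Int) (out : List Int) : Decidable (Spec_solve queries s1 s2 n m out) := by unfold Spec_solve; infer_instance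

-- ===== CLAIM (what is proved, stated in full; the proofs are below) =====
def Claim_equal_solve : Prop := ∀ (queries : List String) (s1 : List Int) (s2 : List Int) (n : Int) (m : Int), Dom_solve queries s1 s2 n m → Pre_solve queries s1 s2 n m → Spec_solve queries s1 s2 n m (solve queries s1 s2 n m)

-- ===== LEMMAS AND PROOFS =====

-- parent lookup (total form; all reasoning is under in-range hypotheses)
def pvPget (p : List Int) (v : Int) : Int := PySem.List.pyGetD p v 0

-- pure root iteration: follow parent pointers for at most f steps
def pvRoot (p : List Int) : Nat → Int → Int
  | 0, v => v
  | f+1, v => if pvPget p v = v then v else pvRoot p f (pvPget p v)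

-- the union-find invariant: entries in range, d certifies acyclicity (0 at roots,
-- strictly decreasing along parent pointers)
def pvChain (L : Nat) (p : List Int) (d : Int → Nat) : Prop :=
  ∀ v : Int, 0 ≤ v → v < (L:Int) →
    (0 ≤ pvPget p v ∧ pvPget p v < (L:Int)) ∧
    (pvPget p v = v → d v = 0) ∧
    (pvPget p v ≠ v → d (pvPget p v) < d v)

-- relation "p' is p with some chains compressed": cell-wise description
def pvSim (L : Nat) (F : Nat) (p p' : List Int) (d : Int → Nat) : Prop :=
  ∀ w : Int, 0 ≤ w → w < (L:Int) →
    (0 ≤ pvPget p' w ∧ pvPget p' w < (L:Int)) ∧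
    (pvPget p' w = w ↔ pvPget p w = w) ∧
    (pvPget p' w ≠ w → d (pvPget p' w) < d w) ∧
    pvRoot p F (pvPget p' w) = pvRoot p F w

theorem pvRoot_of_root (p : List Int) (v : Int) (h : pvPget p v = v) :
    ∀ f, pvRoot p f v = v := by
  intro f; cases f <;> simp [pvRoot, h]

theorem pget_def (p : List Int) (v : Int) : PySem.List.pyGetD p v 0 = pvPget p v := rfl

theorem findA_of_root (f : Nat) (p : List Int) (v : Int) (h : PySem.List.pyGetD p v 0 = v) :
    findA f v p = (v, p) := by
  cases f <;> simp [findA, h]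

theorem findA_len (f : Nat) (v : Int) (p : List Int) :
    (findA f v p).2.length = p.length := by
  induction f generalizing v p with
  | zero => simp [findA]
  | succ f ih =>
    simp only [findA]
    split_ifs with h
    · rfl
    · simp [PySem.List.length_pySetD, ih]

theorem pget_set (L : Nat) (p : List Int) (hlen : p.length = L) (a b x : Int)
    (ha : 0 ≤ a) (_ha2 : a < (L:Int)) (hb : 0 ≤ b) (hb2 : b < (L:Int)) :
    pvPget (PySem.List.pySetD p a x) b = if b = a then x else pvPget p b := by
  unfold pvPget
  rw [PySem.List.pySetD_of_nonneg _ _ ha]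
  rw [PySem.List.pyGetD_eq_getElem _ _ hb (by simp; omega)]
  rw [PySem.List.pyGetD_eq_getElem _ _ hb (by omega)]
  rw [List.getElem_set]
  split_ifs with h1 h2 h2 <;> first | rfl | omega

theorem set_self (L : Nat) (p : List Int) (hlen : p.length = L) (a : Int)
    (ha : 0 ≤ a) (ha2 : a < (L:Int)) (h : pvPget p a = a) :
    PySem.List.pySetD p a a = p := by
  unfold pvPget at h
  rw [PySem.List.pySetD_of_nonneg _ _ ha]
  rw [PySem.List.pyGetD_eq_getElem _ _ ha (by omega)] at h
  have hs := List.set_getElem_self (as := p) (i := a.toNat) (by omega)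
  rw [h] at hs
  exact hs

-- negative-index wrap for pyGetD / pySetD
theorem pget_wrap (L : Nat) (p : List Int) (hlen : p.length = L) (v : Int)
    (h1 : -(L:Int) ≤ v) (h2 : v < 0) : pvPget p v = pvPget p (v + L) := by
  unfold pvPget PySem.List.pyGetD PySem.List.pyGet? PySem.List.pyIdx?
  subst hlen
  have hv : ¬ (0 ≤ v) := by omega
  have he : p.length - (-v).toNat = (v + p.length).toNat := by omega
  simp only [hv, if_false, if_pos (by omega : -(p.length:Int) ≤ v),
    if_pos (by omega : (0:Int) ≤ v + p.length),
    if_pos (by omega : v + p.length < (p.length:Int)), he]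

theorem pset_wrap (L : Nat) (p : List Int) (hlen : p.length = L) (v x : Int)
    (h1 : -(L:Int) ≤ v) (h2 : v < 0) :
    PySem.List.pySetD p v x = PySem.List.pySetD p (v + L) x := by
  unfold PySem.List.pySetD PySem.List.pySet? PySem.List.pyIdx?
  subst hlen
  have hv : ¬ (0 ≤ v) := by omega
  have he : p.length - (-v).toNat = (v + p.length).toNat := by omega
  simp only [hv, if_false, if_pos (by omega : -(p.length:Int) ≤ v),
    if_pos (by omega : (0:Int) ≤ v + p.length),
    if_pos (by omega : v + p.length < (p.length:Int)), he]

-- fuel irrelevance of pvRoot above the depth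
theorem pvRoot_fuel (L : Nat) (p : List Int) (d : Int → Nat) (hC : pvChain L p d) :
    ∀ (k : Nat) (v : Int), 0 ≤ v → v < (L:Int) → d v ≤ k →
      ∀ f g, d v ≤ f → d v ≤ g → pvRoot p f v = pvRoot p g v := by
  intro k
  induction k with
  | zero =>
    intro v h0 h1 hd f g _ _
    have hroot : pvPget p v = v := by
      by_contra h
      have := (hC v h0 h1).2.2 h
      omega
    rw [pvRoot_of_root p v hroot, pvRoot_of_root p v hroot]
  | succ k ih =>
    intro v h0 h1 hd f g hf hg
    by_cases hroot : pvPget p v = v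
    · rw [pvRoot_of_root p v hroot, pvRoot_of_root p v hroot]
    · have hdec := (hC v h0 h1).2.2 hroot
      have hrange := (hC v h0 h1).1
      obtain ⟨f', rfl⟩ : ∃ f', f = f' + 1 := ⟨f - 1, by omega⟩
      obtain ⟨g', rfl⟩ : ∃ g', g = g' + 1 := ⟨g - 1, by omega⟩
      simp only [pvRoot, if_neg hroot]
      exact ih (pvPget p v) hrange.1 hrange.2 (by omega) f' g' (by omega) (by omega)

-- the root is a root and lies in range
theorem pvRoot_is_root (L : Nat) (p : List Int) (d : Int → Nat) (hC : pvChain L p d) :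
    ∀ (k : Nat) (v : Int), 0 ≤ v → v < (L:Int) → d v ≤ k → ∀ f, d v ≤ f →
      0 ≤ pvRoot p f v ∧ pvRoot p f v < (L:Int) ∧ pvPget p (pvRoot p f v) = pvRoot p f v := by
  intro k
  induction k with
  | zero =>
    intro v h0 h1 hd f hf
    have hroot : pvPget p v = v := by
      by_contra h
      have := (hC v h0 h1).2.2 h
      omega
    rw [pvRoot_of_root p v hroot]
    exact ⟨h0, h1, hroot⟩
  | succ k ih =>
    intro v h0 h1 hd f hf
    by_cases hroot : pvPget p v = v
    · rw [pvRoot_of_root p v hroot]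
      exact ⟨h0, h1, hroot⟩
    · have hdec := (hC v h0 h1).2.2 hroot
      have hrange := (hC v h0 h1).1
      obtain ⟨f', rfl⟩ : ∃ f', f = f' + 1 := ⟨f - 1, by omega⟩
      simp only [pvRoot, if_neg hroot]
      exact ih (pvPget p v) hrange.1 hrange.2 (by omega) f' (by omega)

theorem pvRoot_step (L : Nat) (p : List Int) (d : Int → Nat) (hC : pvChain L p d)
    (v : Int) (h0 : 0 ≤ v) (h1 : v < (L:Int)) (hnr : pvPget p v ≠ v)
    (f : Nat) (hf : d v ≤ f) : pvRoot p f v = pvRoot p f (pvPget p v) := by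
  have hd := (hC v h0 h1).2.2 hnr
  have hrange := (hC v h0 h1).1
  obtain ⟨f', rfl⟩ : ∃ f', f = f' + 1 := ⟨f - 1, by omega⟩
  simp only [pvRoot, if_neg hnr]
  exact pvRoot_fuel L p d hC (d (pvPget p v)) _ hrange.1 hrange.2 le_rfl f' (f'+1)
    (by omega) (by omega)

theorem pvSim_refl (L F : Nat) (p : List Int) (d : Int → Nat) (hC : pvChain L p d)
    (hF : ∀ u : Int, 0 ≤ u → u < (L:Int) → d u ≤ F) : pvSim L F p p d := by
  intro w hw0 hw1
  refine ⟨(hC w hw0 hw1).1, Iff.rfl, (hC w hw0 hw1).2.2, ?_⟩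
  by_cases h : pvPget p w = w
  · rw [h]
  · exact (pvRoot_step L p d hC w hw0 hw1 h F (hF w hw0 hw1)).symm

theorem pvSim_chain (L F : Nat) (p p' : List Int) (d : Int → Nat)
    (hC : pvChain L p d) (hS : pvSim L F p p' d) : pvChain L p' d := by
  intro v hv0 hv1
  obtain ⟨hr, hiff, hdec, _⟩ := hS v hv0 hv1
  exact ⟨hr, fun h => (hC v hv0 hv1).2.1 (hiff.mp h), hdec⟩

-- a compressed forest has the same roots
theorem pvSim_root (L F : Nat) (p p' : List Int) (d : Int → Nat)
    (hC : pvChain L p d) (hS : pvSim L F p p' d)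
    (hF : ∀ u : Int, 0 ≤ u → u < (L:Int) → d u ≤ F) :
    ∀ (k : Nat) (w : Int), 0 ≤ w → w < (L:Int) → d w ≤ k →
      pvRoot p' F w = pvRoot p F w := by
  have hC' := pvSim_chain L F p p' d hC hS
  intro k
  induction k with
  | zero =>
    intro w h0 h1 hd
    have hr' : pvPget p' w = w := by
      by_contra h
      have := (hC' w h0 h1).2.2 h
      omega
    have hr : pvPget p w = w := ((hS w h0 h1).2.1).mp hr'
    rw [pvRoot_of_root p' w hr', pvRoot_of_root p w hr]
  | succ k ih =>
    intro w h0 h1 hd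
    by_cases hr' : pvPget p' w = w
    · have hr : pvPget p w = w := ((hS w h0 h1).2.1).mp hr'
      rw [pvRoot_of_root p' w hr', pvRoot_of_root p w hr]
    · have hdec := (hC' w h0 h1).2.2 hr'
      have hrange := (hC' w h0 h1).1
      calc pvRoot p' F w = pvRoot p' F (pvPget p' w) :=
            pvRoot_step L p' d hC' w h0 h1 hr' F (hF w h0 h1)
        _ = pvRoot p F (pvPget p' w) := ih (pvPget p' w) hrange.1 hrange.2 (by omega)
        _ = pvRoot p F w := (hS w h0 h1).2.2.2

-- pvSim composes
theorem pvSim_trans (L F : Nat) (p p' p'' : List Int) (d : Int → Nat)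
    (hC : pvChain L p d) (hS : pvSim L F p p' d) (hS' : pvSim L F p' p'' d)
    (hF : ∀ u : Int, 0 ≤ u → u < (L:Int) → d u ≤ F) :
    pvSim L F p p'' d := by
  intro w hw0 hw1
  obtain ⟨hr', hiff', hdec', hroot'⟩ := hS' w hw0 hw1
  obtain ⟨hr, hiff, hdec, hroot⟩ := hS w hw0 hw1
  refine ⟨hr', hiff'.trans hiff, hdec', ?_⟩
  calc pvRoot p F (pvPget p'' w)
      = pvRoot p' F (pvPget p'' w) :=
        (pvSim_root L F p p' d hC hS hF (d (pvPget p'' w)) _ hr'.1 hr'.2 le_rfl).symm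
    _ = pvRoot p' F w := hroot'
    _ = pvRoot p F w := pvSim_root L F p p' d hC hS hF (d w) w hw0 hw1 le_rfl

-- the central lemma: findA returns the root and compresses (pvSim) the forest
theorem findA_spec (L : Nat) (p : List Int) (d : Int → Nat) (F : Nat)
    (hC : pvChain L p d) (hlen : p.length = L)
    (hF : ∀ u : Int, 0 ≤ u → u < (L:Int) → d u < F) :
    ∀ (k : Nat) (v : Int) (f : Nat), 0 ≤ v → v < (L:Int) → d v ≤ k → d v < f →
      (findA f v p).1 = pvRoot p F v ∧ pvSim L F p (findA f v p).2 d := by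
  have hF' : ∀ u : Int, 0 ≤ u → u < (L:Int) → d u ≤ F := fun u h0 h1 => le_of_lt (hF u h0 h1)
  intro k
  induction k with
  | zero =>
    intro v f h0 h1 hd hf
    have hroot : pvPget p v = v := by
      by_contra h
      have := (hC v h0 h1).2.2 h
      omega
    rw [findA_of_root f p v hroot]
    exact ⟨(pvRoot_of_root p v hroot F).symm, pvSim_refl L F p d hC hF'⟩
  | succ k ih =>
    intro v f h0 h1 hd hf
    by_cases hroot : pvPget p v = v
    · rw [findA_of_root f p v hroot]
      exact ⟨(pvRoot_of_root p v hroot F).symm, pvSim_refl L F p d hC hF'⟩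
    · have hdec := (hC v h0 h1).2.2 hroot
      have hrange := (hC v h0 h1).1
      obtain ⟨f', rfl⟩ : ∃ f', f = f' + 1 := ⟨f - 1, by omega⟩
      have ihres := ih (pvPget p v) f' hrange.1 hrange.2 (by omega) (by omega)
      have hstep : pvRoot p F v = pvRoot p F (pvPget p v) :=
        pvRoot_step L p d hC v h0 h1 hroot F (hF' v h0 h1)
      have hlen2 : (findA f' (pvPget p v) p).2.length = L := by
        rw [findA_len, hlen]
      have hrr := pvRoot_is_root L p d hC (d v) v h0 h1 le_rfl F (hF' v h0 h1)
      have hr0 : 0 ≤ pvRoot p F v := hrr.1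
      have hr1 : pvRoot p F v < (L:Int) := hrr.2.1
      have hrroot : pvPget p (pvRoot p F v) = pvRoot p F v := hrr.2.2
      have hgoal1 : (findA (f'+1) v p).1 = pvRoot p F v := by
        simp only [findA, pget_def, if_neg hroot]
        rw [ihres.1, hstep]
      constructor
      · exact hgoal1
      · -- the compressed forest
        simp only [findA, pget_def, if_neg hroot]
        intro w hw0 hw1
        rw [ihres.1, ← hstep]
        have hset := pget_set L (findA f' (pvPget p v) p).2 hlen2 v w
          ((findA f' (pvPget p v) p).1) h0 h1 hw0 hw1
        rw [ihres.1, ← hstep] at hset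
        by_cases hwv : w = v
        · subst hwv
          rw [if_pos rfl] at hset
          have hrne : pvRoot p F w ≠ w := by
            intro h
            rw [h] at hrroot
            exact hroot hrroot
          refine ⟨by rw [hset]; exact ⟨hr0, hr1⟩, ?_, ?_, ?_⟩
          · constructor
            · intro h; rw [hset] at h; exact absurd h hrne
            · intro h; exact absurd h hroot
          · intro _
            rw [hset]
            have : d (pvRoot p F w) = 0 := (hC _ hr0 hr1).2.1 hrroot
            omega
          · rw [hset, pvRoot_of_root p _ hrroot]
        · rw [if_neg hwv] at hset
          obtain ⟨hr', hiff', hdec', hroot'⟩ := ihres.2 w hw0 hw1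
          rw [hset]
          exact ⟨hr', hiff', hdec', hroot'⟩

-- the top-level find call of A on a possibly negative index wraps to its normalisation
theorem findA_neg (L : Nat) (p : List Int) (hlen : p.length = L)
    (hent : ∀ u : Int, 0 ≤ u → u < (L:Int) → 0 ≤ pvPget p u ∧ pvPget p u < (L:Int))
    (v : Int) (h1 : -(L:Int) ≤ v) (h2 : v < 0) (f : Nat) :
    findA (f+1) v p = findA (f+1) (v + L) p := by
  have hw0 : 0 ≤ v + (L:Int) := by omega
  have hw1 : v + (L:Int) < (L:Int) := by omega
  have hpw : PySem.List.pyGetD p v 0 = pvPget p (v + L) := pget_wrap L p hlen v h1 h2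
  have hrange := hent (v + L) hw0 hw1
  by_cases hroot : pvPget p (v + L) = v + L
  · have hres : findA f (pvPget p (v+L)) p = (v + L, p) := by
      rw [hroot]; exact findA_of_root f p (v + L) hroot
    conv_lhs => simp only [findA]
    rw [hpw]
    rw [if_neg (show ¬ pvPget p (v+L) = v by omega)]
    rw [hres]
    rw [findA_of_root (f+1) p (v+L) (pget_def p (v+L) ▸ hroot)]
    simp only
    rw [pset_wrap L p hlen v (v+L) h1 h2, set_self L p hlen (v+L) hw0 hw1 hroot]
  · conv_lhs => simp only [findA]
    conv_rhs => simp only [findA]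
    rw [hpw, pget_def p (v + (L:Int))]
    rw [if_neg (show ¬ pvPget p (v+L) = v by omega), if_neg hroot]
    have hlen2 : (findA f (pvPget p (v+L)) p).2.length = L := by rw [findA_len, hlen]
    rw [pset_wrap L _ hlen2 v _ h1 h2]

-- union: parent[y] := x for distinct roots x y
theorem union_spec (L F : Nat) (p : List Int) (d : Int → Nat)
    (hC : pvChain L p d) (hlen : p.length = L)
    (hF : ∀ u : Int, 0 ≤ u → u < (L:Int) → d u < F)
    (x y : Int) (hx0 : 0 ≤ x) (hx1 : x < (L:Int)) (hy0 : 0 ≤ y) (hy1 : y < (L:Int))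
    (hxr : pvPget p x = x) (hyr : pvPget p y = y) (hxy : x ≠ y) :
    pvChain L (PySem.List.pySetD p y x) (fun v => if pvRoot p F v = y then d v + 1 else d v) ∧
    (∀ w : Int, 0 ≤ w → w < (L:Int) →
      pvRoot (PySem.List.pySetD p y x) F w =
        if pvRoot p F w = y then x else pvRoot p F w) := by
  have hget' : ∀ w : Int, 0 ≤ w → w < (L:Int) →
      pvPget (PySem.List.pySetD p y x) w = if w = y then x else pvPget p w :=
    fun w hw0 hw1 => pget_set L p hlen y w x hy0 hy1 hw0 hw1
  have hrooty : pvRoot p F y = y := pvRoot_of_root p y hyr F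
  have hrootx : pvRoot p F x = x := pvRoot_of_root p x hxr F
  have hdx : d x = 0 := (hC x hx0 hx1).2.1 hxr
  have hdy : d y = 0 := (hC y hy0 hy1).2.1 hyr
  have hchain : pvChain L (PySem.List.pySetD p y x)
      (fun v => if pvRoot p F v = y then d v + 1 else d v) := by
    intro v hv0 hv1
    have hgv := hget' v hv0 hv1
    by_cases hvy : v = y
    · rw [hvy] at hgv ⊢
      rw [if_pos rfl] at hgv
      refine ⟨by rw [hgv]; exact ⟨hx0, hx1⟩, ?_, ?_⟩
      · intro h; rw [hgv] at h; exact absurd h hxy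
      · intro _
        rw [hgv]
        show (if pvRoot p F x = y then d x + 1 else d x) <
          (if pvRoot p F y = y then d y + 1 else d y)
        split_ifs <;> omega
    · rw [if_neg hvy] at hgv
      refine ⟨by rw [hgv]; exact (hC v hv0 hv1).1, ?_, ?_⟩
      · intro h
        rw [hgv] at h
        have hd0 := (hC v hv0 hv1).2.1 h
        have hrv : pvRoot p F v = v := pvRoot_of_root p v h F
        show (if pvRoot p F v = y then d v + 1 else d v) = 0
        split_ifs <;> omega
      · intro hne
        rw [hgv] at hne ⊢
        have hdec := (hC v hv0 hv1).2.2 hne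
        have hstep : pvRoot p F (pvPget p v) = pvRoot p F v :=
          (pvRoot_step L p d hC v hv0 hv1 hne F (le_of_lt (hF v hv0 hv1))).symm
        show (if pvRoot p F (pvPget p v) = y then d (pvPget p v) + 1 else d (pvPget p v)) <
          (if pvRoot p F v = y then d v + 1 else d v)
        split_ifs <;> omega
  refine ⟨hchain, ?_⟩
  have hF' : ∀ u : Int, 0 ≤ u → u < (L:Int) →
      (if pvRoot p F u = y then d u + 1 else d u) ≤ F := by
    intro u h0 h1
    have := hF u h0 h1
    show (if pvRoot p F u = y then d u + 1 else d u) ≤ F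
    split_ifs <;> omega
  have hbase : ∀ (w : Int), 0 ≤ w → w < (L:Int) → pvPget p w = w →
      pvRoot (PySem.List.pySetD p y x) F w =
        if pvRoot p F w = y then x else pvRoot p F w := by
    intro w h0 h1 hroot
    have hrw : pvRoot p F w = w := pvRoot_of_root p w hroot F
    rw [hrw]
    by_cases hwy : w = y
    · rw [if_pos hwy, hwy]
      have hgy : pvPget (PySem.List.pySetD p y x) y = x := by
        rw [hget' y hy0 hy1, if_pos rfl]
      have hgx : pvPget (PySem.List.pySetD p y x) x = x := by
        rw [hget' x hx0 hx1, if_neg hxy, hxr]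
      have hFpos : 0 < F := lt_of_le_of_lt (Nat.zero_le _) (hF y hy0 hy1)
      obtain ⟨F', rfl⟩ : ∃ F', F = F' + 1 := ⟨F - 1, by omega⟩
      show pvRoot (PySem.List.pySetD p y x) (F'+1) y = x
      simp only [pvRoot, pget_def, hgy, if_neg hxy]
      exact pvRoot_of_root _ x hgx F'
    · rw [if_neg hwy]
      have : pvPget (PySem.List.pySetD p y x) w = w := by
        rw [hget' w h0 h1, if_neg hwy, hroot]
      exact pvRoot_of_root _ w this F
  have haux : ∀ (k : Nat) (w : Int), 0 ≤ w → w < (L:Int) → d w ≤ k →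
      pvRoot (PySem.List.pySetD p y x) F w =
        if pvRoot p F w = y then x else pvRoot p F w := by
    intro k
    induction k with
    | zero =>
      intro w h0 h1 hd
      have hroot : pvPget p w = w := by
        by_contra h
        have := (hC w h0 h1).2.2 h
        omega
      exact hbase w h0 h1 hroot
    | succ k ih =>
      intro w h0 h1 hd
      by_cases hroot : pvPget p w = w
      · exact hbase w h0 h1 hroot
      · have hwy : w ≠ y := fun h => hroot (h ▸ hyr)
        have hdec := (hC w h0 h1).2.2 hroot
        have hrange := (hC w h0 h1).1
        have hg : pvPget (PySem.List.pySetD p y x) w = pvPget p w := by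
          rw [hget' w h0 h1, if_neg hwy]
        have hstep : pvRoot p F (pvPget p w) = pvRoot p F w :=
          (pvRoot_step L p d hC w h0 h1 hroot F (le_of_lt (hF w h0 h1))).symm
        have hstep' : pvRoot (PySem.List.pySetD p y x) F w =
            pvRoot (PySem.List.pySetD p y x) F (pvPget p w) := by
          have := pvRoot_step L (PySem.List.pySetD p y x)
            (fun v => if pvRoot p F v = y then d v + 1 else d v) hchain w h0 h1
            (by rw [hg]; exact hroot) F (hF' w h0 h1)
          rw [hg] at this
          exact this
        rw [hstep', ih (pvPget p w) hrange.1 hrange.2 (by omega), hstep]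
  intro w h0 h1
  exact haux (d w) w h0 h1 le_rfl

-- counting after a relabel map
theorem count_map_relabel (l : List Int) (x y c : Int) (hxy : x ≠ y) :
    (l.map (fun v => if v = y then x else v)).count c =
      if c = x then l.count x + l.count y else if c = y then 0 else l.count c := by
  induction l with
  | nil => simp
  | cons h t ih =>
    simp only [List.map_cons, List.count_cons, ih, beq_iff_eq]
    by_cases h3 : h = y
    · subst h3
      simp only [if_pos rfl]
      split_ifs <;> omega
    · rw [if_neg h3]
      split_ifs <;> omega

theorem pget_pyRange (L : Nat) (v : Int) (h0 : 0 ≤ v) (h1 : v < (L:Int)) :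
    pvPget (PySem.List.pyRange 0 (L:Int) 1) v = v := by
  unfold pvPget
  rw [PySem.List.pyGetD_eq_getElem _ _ h0 (by rw [PySem.List.length_pyRange_one]; omega)]
  rw [PySem.List.getElem_pyRange_one]
  omega

theorem lab_get (L : Nat) (f : Int → Int) (v : Int) (h0 : 0 ≤ v) (h1 : v < (L:Int)) :
    pvPget ((PySem.List.pyRange 0 (L:Int) 1).map f) v = f v := by
  unfold pvPget
  exact PySem.List.pyGetD_map_pyRange_of_nonneg f (L:Int) v 0 h0 h1

theorem lab_len (L : Nat) (f : Int → Int) :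
    ((PySem.List.pyRange 0 (L:Int) 1).map f).length = L := by
  rw [List.length_map, PySem.List.length_pyRange_one]
  omega

-- a possibly negative in-range index normalises for both find and label lookup
theorem norm_exists (L : Nat) (v : Int) (h : PySem.Raise.InRange L v) :
    ∃ u : Int, 0 ≤ u ∧ u < (L:Int) ∧
      (∀ (f : Nat) (pp : List Int), pp.length = L →
        (∀ w : Int, 0 ≤ w → w < (L:Int) → 0 ≤ pvPget pp w ∧ pvPget pp w < (L:Int)) →
        findA (f+1) v pp = findA (f+1) u pp) ∧
      (∀ (q : List Int), q.length = L → pvPget q v = pvPget q u) := by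
  obtain ⟨hlo, hhi⟩ := h
  by_cases hneg : v < 0
  · exact ⟨v + L, by omega, by omega,
      fun f pp hl he => findA_neg L pp hl he v hlo hneg f,
      fun q hq => pget_wrap L q hq v hlo hneg⟩
  · exact ⟨v, by omega, by omega, fun _ _ _ _ => rfl, fun _ _ => rfl⟩

-- the main loop invariant: A's (parent, size) and B's label list describe the same partition
theorem loop_eq (queries : List String) (s1 s2 : List Int) (L F : Nat) :
    ∀ (is : List Int) (res p size : List Int) (d : Int → Nat),
      (∀ i ∈ is, 0 ≤ i ∧ i.toNat < s1.length ∧ i.toNat < s2.length ∧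
        PySem.Raise.InRange L (s1.getD i.toNat 0) ∧ PySem.Raise.InRange L (s2.getD i.toNat 0)) →
      p.length = L → size.length = L →
      pvChain L p d →
      (∀ v : Int, 0 ≤ v → v < (L:Int) → d v + is.length < F) →
      (∀ c : Int, 0 ≤ c → c < (L:Int) → pvPget p c = c →
        pvPget size c =
          ((((PySem.List.pyRange 0 (L:Int) 1).map (fun v => pvRoot p F v)).count c : Nat) : Int)) →
      (is.foldl (stepA queries s1 s2 F) (res, p, size)).1 =
      (is.foldl (stepB queries s1 s2)
        (res, (PySem.List.pyRange 0 (L:Int) 1).map (fun v => pvRoot p F v))).1 := by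
  intro is
  induction is with
  | nil => intro res p size d _ _ _ _ _ _; rfl
  | cons i rest ih =>
    intro res p size d hvalid hplen hszlen hC hdepth hsize
    obtain ⟨hi0, hi1, hi2, hir1, hir2⟩ := hvalid i (List.mem_cons_self)
    have hF1 : ∀ v : Int, 0 ≤ v → v < (L:Int) → d v < F := by
      intro v a b
      have := hdepth v a b
      simp only [List.length_cons] at this
      omega
    have hFle : ∀ v : Int, 0 ≤ v → v < (L:Int) → d v ≤ F :=
      fun v a b => le_of_lt (hF1 v a b)
    have hent : ∀ w : Int, 0 ≤ w → w < (L:Int) → 0 ≤ pvPget p w ∧ pvPget p w < (L:Int) :=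
      fun w a b => (hC w a b).1
    set lab := (PySem.List.pyRange 0 (L:Int) 1).map (fun v => pvRoot p F v) with hlab
    have hlablen : lab.length = L := lab_len L _
    set sv1 := PySem.List.pyGetD s1 i 0 with hsv1d
    set sv2 := PySem.List.pyGetD s2 i 0 with hsv2d
    have hsv1 : sv1 = s1.getD i.toNat 0 := by
      rw [hsv1d]
      unfold PySem.List.pyGetD
      rw [List.getD_eq_getElem?_getD]
      congr 1
      unfold PySem.List.pyGet? PySem.List.pyIdx?
      rw [if_pos hi0, if_pos (by omega : i < (s1.length:Int))]
      rfl
    have hsv2 : sv2 = s2.getD i.toNat 0 := by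
      rw [hsv2d]
      unfold PySem.List.pyGetD
      rw [List.getD_eq_getElem?_getD]
      congr 1
      unfold PySem.List.pyGet? PySem.List.pyIdx?
      rw [if_pos hi0, if_pos (by omega : i < (s2.length:Int))]
      rfl
    have hir1' : PySem.Raise.InRange L sv1 := hsv1 ▸ hir1
    have hir2' : PySem.Raise.InRange L sv2 := hsv2 ▸ hir2
    obtain ⟨u1, hu10, hu11, hfw1, hqw1⟩ := norm_exists L sv1 hir1'
    obtain ⟨u2, hu20, hu21, hfw2, hqw2⟩ := norm_exists L sv2 hir2'
    have hL0 : 0 < L := by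
      obtain ⟨hlo, hhi⟩ := hir1'
      omega
    obtain ⟨F0, rfl⟩ : ∃ F0, F = F0 + 1 := ⟨F - 1, by have := hF1 0 le_rfl (by exact_mod_cast hL0); omega⟩
    -- the first find call of A
    have hfx : findA (F0+1) sv1 p = findA (F0+1) u1 p := hfw1 F0 p hplen hent
    have hspec1 := findA_spec L p d (F0+1) hC hplen hF1 (d u1) u1 (F0+1) hu10 hu11 le_rfl
      (hF1 u1 hu10 hu11)
    set x := pvRoot p (F0+1) u1 with hxdef
    set p1 := (findA (F0+1) u1 p).2 with hp1def
    have h1a : (findA (F0+1) sv1 p).1 = x := by rw [hfx]; exact hspec1.1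
    have h1b : (findA (F0+1) sv1 p).2 = p1 := by rw [hfx]
    have hsim1 : pvSim L (F0+1) p p1 d := hspec1.2
    have hC1 : pvChain L p1 d := pvSim_chain _ _ _ _ _ hC hsim1
    have hp1len : p1.length = L := by rw [hp1def, findA_len, hplen]
    have hroots1 : ∀ w : Int, 0 ≤ w → w < (L:Int) → pvRoot p1 (F0+1) w = pvRoot p (F0+1) w :=
      fun w a b => pvSim_root L (F0+1) p p1 d hC hsim1 hFle (d w) w a b le_rfl
    -- the second find call of A, on the compressed p1
    have hent1 : ∀ w : Int, 0 ≤ w → w < (L:Int) → 0 ≤ pvPget p1 w ∧ pvPget p1 w < (L:Int) :=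
      fun w a b => (hC1 w a b).1
    have hfy : findA (F0+1) sv2 p1 = findA (F0+1) u2 p1 := hfw2 F0 p1 hp1len hent1
    have hspec2 := findA_spec L p1 d (F0+1) hC1 hp1len hF1 (d u2) u2 (F0+1) hu20 hu21 le_rfl
      (hF1 u2 hu20 hu21)
    set y := pvRoot p (F0+1) u2 with hydef
    set p2 := (findA (F0+1) u2 p1).2 with hp2def
    have h2a : (findA (F0+1) sv2 p1).1 = y := by
      rw [hfy, hspec2.1]
      exact hroots1 u2 hu20 hu21
    have h2b : (findA (F0+1) sv2 p1).2 = p2 := by rw [hfy]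
    have hsim2 : pvSim L (F0+1) p1 p2 d := hspec2.2
    have hC2 : pvChain L p2 d := pvSim_chain _ _ _ _ _ hC1 hsim2
    have hp2len : p2.length = L := by rw [hp2def, findA_len, hp1len]
    have hsim12 : pvSim L (F0+1) p p2 d := pvSim_trans L (F0+1) p p1 p2 d hC hsim1 hsim2 hFle
    have hroots12 : ∀ w : Int, 0 ≤ w → w < (L:Int) → pvRoot p2 (F0+1) w = pvRoot p (F0+1) w :=
      fun w a b => pvSim_root L (F0+1) p p2 d hC hsim12 hFle (d w) w a b le_rfl
    -- x and y are roots, of p and of p2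
    have hxrr := pvRoot_is_root L p d hC (d u1) u1 hu10 hu11 le_rfl (F0+1) (hFle u1 hu10 hu11)
    have hyrr := pvRoot_is_root L p d hC (d u2) u2 hu20 hu21 le_rfl (F0+1) (hFle u2 hu20 hu21)
    have hx0 : 0 ≤ x := hxrr.1
    have hx1L : x < (L:Int) := hxrr.2.1
    have hxr : pvPget p x = x := hxrr.2.2
    have hy0 : 0 ≤ y := hyrr.1
    have hy1L : y < (L:Int) := hyrr.2.1
    have hyr : pvPget p y = y := hyrr.2.2
    have hxr2 : pvPget p2 x = x := ((hsim12 x hx0 hx1L).2.1).mpr hxr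
    have hyr2 : pvPget p2 y = y := ((hsim12 y hy0 hy1L).2.1).mpr hyr
    -- B's label lookups
    have ha : pvPget lab sv1 = x := by
      rw [hqw1 lab hlablen, hlab, lab_get L _ u1 hu10 hu11]
    have hb : pvPget lab sv2 = y := by
      rw [hqw2 lab hlablen, hlab, lab_get L _ u2 hu20 hu21]
    -- the relabelled/compressed label list equals the canonical one for p2
    have hmapeq : (PySem.List.pyRange 0 (L:Int) 1).map (fun v => pvRoot p2 (F0+1) v) = lab := by
      rw [hlab]
      refine List.map_congr_left (fun v hv => ?_)
      rw [PySem.List.mem_pyRange_one] at hv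
      exact hroots12 v hv.1 hv.2
    -- sizes at roots of p2 are unchanged
    have hsize2 : ∀ c : Int, 0 ≤ c → c < (L:Int) → pvPget p2 c = c →
        pvPget size c =
          ((((PySem.List.pyRange 0 (L:Int) 1).map (fun v => pvRoot p2 (F0+1) v)).count c : Nat) : Int) := by
      intro c hc0 hc1 hcr
      rw [hmapeq]
      exact hsize c hc0 hc1 (((hsim12 c hc0 hc1).2.1).mp hcr)
    have hvalid' : ∀ j ∈ rest, 0 ≤ j ∧ j.toNat < s1.length ∧ j.toNat < s2.length ∧
        PySem.Raise.InRange L (s1.getD j.toNat 0) ∧ PySem.Raise.InRange L (s2.getD j.toNat 0) :=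
      fun j hj => hvalid j (List.mem_cons_of_mem i hj)
    have hdepth' : ∀ v : Int, 0 ≤ v → v < (L:Int) → d v + rest.length < F0 + 1 := by
      intro v a b
      have := hdepth v a b
      simp only [List.length_cons] at this
      omega
    -- unfold one loop step
    simp only [List.foldl_cons, stepA, stepB]
    rw [h1a, h1b, h2a, h2b]
    rw [show PySem.List.pyGetD lab sv1 0 = pvPget lab sv1 from rfl,
        show PySem.List.pyGetD lab sv2 0 = pvPget lab sv2 from rfl, ha, hb]
    by_cases hq : PySem.List.pyGetD queries i "" = "Friend"
    · rw [if_pos hq, if_pos hq]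
      by_cases hxy : x = y
      · rw [if_neg (fun h => h hxy), if_neg (fun h => h hxy)]
        rw [← hmapeq]
        exact ih res p2 size d hvalid' hp2len hszlen hC2 hdepth' hsize2
      · rw [if_pos hxy, if_pos hxy]
        have hunion := union_spec L (F0+1) p2 d hC2 hp2len hF1 x y hx0 hx1L hy0 hy1L hxr2 hyr2 hxy
        set p3 := PySem.List.pySetD p2 y x with hp3
        have hp3len : p3.length = L := by rw [hp3, PySem.List.length_pySetD, hp2len]
        have hdepth3 : ∀ v : Int, 0 ≤ v → v < (L:Int) →
            (if pvRoot p2 (F0+1) v = y then d v + 1 else d v) + rest.length < F0 + 1 := by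
          intro v a b
          have := hdepth v a b
          simp only [List.length_cons] at this
          split_ifs <;> omega
        have hmapeq3 : (PySem.List.pyRange 0 (L:Int) 1).map (fun v => pvRoot p3 (F0+1) v)
            = lab.map (fun c => if c = y then x else c) := by
          rw [hlab, List.map_map]
          refine List.map_congr_left (fun v hv => ?_)
          rw [PySem.List.mem_pyRange_one] at hv
          show pvRoot p3 (F0+1) v = if pvRoot p (F0+1) v = y then x else pvRoot p (F0+1) v
          rw [hp3, hunion.2 v hv.1 hv.2, hroots12 v hv.1 hv.2]
        have hsize3 : ∀ c : Int, 0 ≤ c → c < (L:Int) → pvPget p3 c = c →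
            pvPget (PySem.List.pySetD size x (PySem.List.pyGetD size x 0 + PySem.List.pyGetD size y 0)) c
              = ((((PySem.List.pyRange 0 (L:Int) 1).map (fun v => pvRoot p3 (F0+1) v)).count c : Nat) : Int) := by
          intro c hc0 hc1 hcr
          rw [hp3, pget_set L p2 hp2len y c x hy0 hy1L hc0 hc1] at hcr
          have hcy : c ≠ y := by
            intro h
            rw [if_pos h] at hcr
            exact hxy (hcr.trans h)
          rw [if_neg hcy] at hcr
          have hcrp : pvPget p c = c := ((hsim12 c hc0 hc1).2.1).mp hcr
          rw [hmapeq3, count_map_relabel lab x y c hxy]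
          rw [pget_set L size hszlen x c _ hx0 hx1L hc0 hc1]
          by_cases hcx : c = x
          · rw [if_pos hcx, if_pos hcx]
            rw [show PySem.List.pyGetD size x 0 = pvPget size x from rfl,
                show PySem.List.pyGetD size y 0 = pvPget size y from rfl]
            rw [hsize x hx0 hx1L hxr, hsize y hy0 hy1L hyr]
            push_cast
            ring
          · rw [if_neg hcx, if_neg hcx, if_neg hcy]
            exact hsize c hc0 hc1 hcrp
        rw [← hmapeq3]
        exact ih res p3 _ _ hvalid' hp3len (by rw [PySem.List.length_pySetD, hszlen])
          hunion.1 hdepth3 hsize3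
    · rw [if_neg hq, if_neg hq]
      have hvx : PySem.List.pyGetD size x 0 = ((PySem.List.count lab x : Nat) : Int) := by
        rw [PySem.List.count_eq]
        exact hsize x hx0 hx1L hxr
      have hvy : PySem.List.pyGetD size y 0 = ((PySem.List.count lab y : Nat) : Int) := by
        rw [PySem.List.count_eq]
        exact hsize y hy0 hy1L hyr
      rw [hvx, hvy, ← hmapeq]
      exact ih _ p2 size d hvalid' hp2len hszlen hC2 hdepth' hsize2

-- ===== VERDICT (by name: the statement is the Claim_ definition above) =====
theorem solve_spec : Claim_equal_solve := by
  intro queries s1 s2 n m hdom hpre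
  unfold Spec_solve solve solve_alt
  obtain ⟨hql, h1, h2, hir⟩ := hpre
  have hrange_eq : PySem.List.pyRange 0 (m+1) 1
      = PySem.List.pyRange 0 (((m+1).toNat : Nat) : Int) 1 := by
    by_cases h : 0 ≤ m + 1
    · congr 1
      omega
    · rw [PySem.List.pyRange_one_eq_nil (by omega), PySem.List.pyRange_one_eq_nil (by omega)]
  rw [hrange_eq]
  have hinit : ∀ v : Int, 0 ≤ v → v < (((m+1).toNat : Nat) : Int) →
      pvPget (PySem.List.pyRange 0 (((m+1).toNat : Nat) : Int) 1) v = v :=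
    fun v a b => pget_pyRange (m+1).toNat v a b
  have hC0 : pvChain (m+1).toNat (PySem.List.pyRange 0 (((m+1).toNat : Nat) : Int) 1)
      (fun _ => 0) := by
    intro v h0 h1
    rw [hinit v h0 h1]
    exact ⟨⟨h0, h1⟩, fun _ => rfl, fun h => absurd rfl h⟩
  have hid : (PySem.List.pyRange 0 (((m+1).toNat : Nat) : Int) 1).map
      (fun v => pvRoot (PySem.List.pyRange 0 (((m+1).toNat : Nat) : Int) 1) (n.toNat+1) v)
      = PySem.List.pyRange 0 (((m+1).toNat : Nat) : Int) 1 := by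
    have hc : ∀ v ∈ PySem.List.pyRange 0 (((m+1).toNat : Nat) : Int) 1,
        pvRoot (PySem.List.pyRange 0 (((m+1).toNat : Nat) : Int) 1) (n.toNat+1) v
          = (fun v : Int => v) v := by
      intro v hv
      rw [PySem.List.mem_pyRange_one] at hv
      exact pvRoot_of_root _ v (hinit v hv.1 hv.2) _
    rw [List.map_congr_left hc, List.map_id']
  have hsz0 : ∀ c : Int, 0 ≤ c → c < (((m+1).toNat : Nat) : Int) →
      pvPget (PySem.List.pyRange 0 (((m+1).toNat : Nat) : Int) 1) c = c →
      pvPget (List.replicate (m+1).toNat (1:Int)) c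
        = ((((PySem.List.pyRange 0 (((m+1).toNat : Nat) : Int) 1).map
            (fun v => pvRoot (PySem.List.pyRange 0 (((m+1).toNat : Nat) : Int) 1) (n.toNat+1) v)).count c : Nat) : Int) := by
    intro c h0 h1 _
    rw [hid]
    unfold pvPget
    rw [PySem.List.pyGetD_eq_getElem _ _ h0 (by rw [List.length_replicate]; omega)]
    rw [List.getElem_replicate]
    rw [List.count_eq_one_of_mem (PySem.List.nodup_pyRange_one 0 _)
      (by rw [PySem.List.mem_pyRange_one]; exact ⟨h0, h1⟩)]
    rfl
  have hvalid0 : ∀ i ∈ PySem.List.pyRange 0 n 1,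
      0 ≤ i ∧ i.toNat < s1.length ∧ i.toNat < s2.length ∧
      PySem.Raise.InRange (m+1).toNat (s1.getD i.toNat 0) ∧
      PySem.Raise.InRange (m+1).toNat (s2.getD i.toNat 0) := by
    intro i hi
    rw [PySem.List.mem_pyRange_one] at hi
    have hmin : min n.toNat s1.length = n.toNat := by omega
    have hmem : i.toNat ∈ List.range (min n.toNat s1.length) := by
      rw [hmin, List.mem_range]
      omega
    obtain ⟨hA, hB⟩ := hir i.toNat hmem
    exact ⟨hi.1, by omega, by omega, hA, hB⟩
  have hdep0 : ∀ v : Int, 0 ≤ v → v < (((m+1).toNat : Nat) : Int) →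
      (fun _ : Int => 0) v + (PySem.List.pyRange 0 n 1).length < n.toNat + 1 := by
    intro v _ _
    rw [PySem.List.length_pyRange_one]
    simp only
    omega
  have hmain := loop_eq queries s1 s2 (m+1).toNat (n.toNat+1) (PySem.List.pyRange 0 n 1)
    [] (PySem.List.pyRange 0 (((m+1).toNat : Nat) : Int) 1) (List.replicate (m+1).toNat 1)
    (fun _ => 0) hvalid0
    (by rw [PySem.List.length_pyRange_one]; omega)
    (by rw [List.length_replicate])
    hC0 hdep0 hsz0
  rw [hid] at hmain
  exact hmain
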